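-- pv_equiv track=rewrite | github.com/TheSeeker713/PocketJournal | src/pocket_journal/ui/help_center.py | _process_helper_links
-- ===== SOURCE A (Python) =====
-- def _process_helper_links(html: str) -> str:
--     """Process helper action links."""
--     # Define helper actions
--     helpers = {
--         "copy-data-folder-path": "Copy Data Folder Path",
--         "open-data-folder": "Open Data Folder",
--         "reset-formatting": "Reset Formatting to Defaults"
--     }
--
--     for action, text in helpers.items():
--         # Replace markdown-style links with HTML helper links
--         link_pattern = f'<a href="#{action}">{text}</a>'
--         helper_html = f'<a href="helper://{action}" class="helper-link">{text}</a>'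
--         html = html.replace(link_pattern, helper_html)
--
--     return html
-- ===== SOURCE B (Python) =====
-- def _process_helper_links(html: str) -> str:
--     """Process helper action links (single left-to-right pass over html)."""
--     p1 = '<a href="#copy-data-folder-path">Copy Data Folder Path</a>'
--     r1 = '<a href="helper://copy-data-folder-path" class="helper-link">Copy Data Folder Path</a>'
--     p2 = '<a href="#open-data-folder">Open Data Folder</a>'
--     r2 = '<a href="helper://open-data-folder" class="helper-link">Open Data Folder</a>'
--     p3 = '<a href="#reset-formatting">Reset Formatting to Defaults</a>'
--     r3 = '<a href="helper://reset-formatting" class="helper-link">Reset Formatting to Defaults</a>'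
--     out = []
--     i = 0
--     n = len(html)
--     while i < n:
--         if html.startswith(p1, i):
--             out.append(r1)
--             i += len(p1)
--         elif html.startswith(p2, i):
--             out.append(r2)
--             i += len(p2)
--         elif html.startswith(p3, i):
--             out.append(r3)
--             i += len(p3)
--         else:
--             out.append(html[i])
--             i += 1
--     return "".join(out)
-- ===== Notes on version B (the rewrite author's own statement) =====
-- stated objective: alternative
-- what changed: Replaces A's three sequential full-string str.replace passes by one explicit left-to-right scan that tries the three link patterns at each position and emits pieces joined once; same O(n) cost (A's passes are C-level, so B is not faster in CPython).
import Mathlib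
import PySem

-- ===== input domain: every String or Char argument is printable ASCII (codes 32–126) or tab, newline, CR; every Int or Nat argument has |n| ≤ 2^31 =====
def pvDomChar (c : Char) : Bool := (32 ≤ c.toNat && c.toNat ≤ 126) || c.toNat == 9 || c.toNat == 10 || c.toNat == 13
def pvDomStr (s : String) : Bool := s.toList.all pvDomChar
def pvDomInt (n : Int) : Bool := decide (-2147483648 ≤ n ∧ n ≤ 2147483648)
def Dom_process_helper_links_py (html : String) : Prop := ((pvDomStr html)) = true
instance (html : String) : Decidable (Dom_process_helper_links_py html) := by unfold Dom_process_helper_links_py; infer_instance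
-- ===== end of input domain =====

set_option maxHeartbeats 1000000
set_option maxRecDepth 4096


-- B replaces A's three sequential full-string str.replace passes by one left-to-right scan
-- that tries the three link patterns at each position; objective: alternative (single pass instead of three).

-- ===== PORT A =====
-- literal port of A: dict of helpers, then for each (action, text) a full-string str.replace
def process_helper_links_py (html : String) : String :=
  let helpers : PySem.Dict String String :=
    ((PySem.Dict.empty.insert "copy-data-folder-path" "Copy Data Folder Path").insert
        "open-data-folder" "Open Data Folder").insert
        "reset-formatting" "Reset Formatting to Defaults"
  helpers.items.foldl (fun html at_ =>
    let action := at_.1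
    let text := at_.2
    let link_pattern := "<a href=\"#" ++ action ++ "\">" ++ text ++ "</a>"
    let helper_html := "<a href=\"helper://" ++ action ++ "\" class=\"helper-link\">" ++ text ++ "</a>"
    PySem.Str.replace html link_pattern helper_html) html

-- ===== PORT B =====
-- the three (pattern, replacement) pairs Source B builds up front
def pvPat1 : List Char := "<a href=\"#copy-data-folder-path\">Copy Data Folder Path</a>".toList
def pvRep1 : List Char := "<a href=\"helper://copy-data-folder-path\" class=\"helper-link\">Copy Data Folder Path</a>".toList
def pvPat2 : List Char := "<a href=\"#open-data-folder\">Open Data Folder</a>".toList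
def pvRep2 : List Char := "<a href=\"helper://open-data-folder\" class=\"helper-link\">Open Data Folder</a>".toList
def pvPat3 : List Char := "<a href=\"#reset-formatting\">Reset Formatting to Defaults</a>".toList
def pvRep3 : List Char := "<a href=\"helper://reset-formatting\" class=\"helper-link\">Reset Formatting to Defaults</a>".toList

-- Source B's while-loop: at each position try pattern 1 / 2 / 3, else copy one character
def pvScanB (l : List Char) : List Char :=
  match l with
  | [] => []
  | c :: t =>
    if pvPat1.isPrefixOf (c :: t) then pvRep1 ++ pvScanB ((c :: t).drop pvPat1.length)
    else if pvPat2.isPrefixOf (c :: t) then pvRep2 ++ pvScanB ((c :: t).drop pvPat2.length)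
    else if pvPat3.isPrefixOf (c :: t) then pvRep3 ++ pvScanB ((c :: t).drop pvPat3.length)
    else c :: pvScanB t
termination_by l.length
decreasing_by
  · rw [List.length_drop]; exact Nat.sub_lt (by simp) (by decide)
  · rw [List.length_drop]; exact Nat.sub_lt (by simp) (by decide)
  · rw [List.length_drop]; exact Nat.sub_lt (by simp) (by decide)
  · simp

def process_helper_links_py_alt (html : String) : String :=
  String.ofList (pvScanB html.toList)

-- ===== PRECONDITION & SPEC =====
def Spec_process_helper_links_py (html : String) (out : String) : Prop := out = process_helper_links_py_alt html
instance (html : String) (out : String) : Decidable (Spec_process_helper_links_py html out) := by unfold Spec_process_helper_links_py; infer_instance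

-- ===== CLAIM (what is proved, stated in full; the proofs are below) =====
def Claim_equal_process_helper_links_py : Prop := ∀ (html : String), Dom_process_helper_links_py html → Spec_process_helper_links_py html (process_helper_links_py html)

-- ===== LEMMAS AND PROOFS =====

-- purely structural form of Python's str.replace (old ≠ []): leftmost, non-overlapping
def pvRepPure (p r : List Char) (hp : 0 < p.length) (l : List Char) : List Char :=
  match l with
  | [] => []
  | c :: t =>
    if p.isPrefixOf (c :: t) then r ++ pvRepPure p r hp ((c :: t).drop p.length)
    else c :: pvRepPure p r hp t
termination_by l.length
decreasing_by
  · rw [List.length_drop]; exact Nat.sub_lt (by simp) hp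
  · simp

theorem pvGo_eq (p r : List Char) (hp : 0 < p.length) :
    ∀ (fuel : Nat) (l acc : List Char), l.length ≤ fuel →
      PySem.Chars.replace.go p r fuel l acc = acc.reverse ++ pvRepPure p r hp l := by
  intro fuel
  induction fuel with
  | zero =>
    intro l acc h
    have : l = [] := List.length_eq_zero_iff.mp (Nat.le_zero.mp h)
    subst this
    simp [PySem.Chars.replace.go, pvRepPure]
  | succ n ih =>
    intro l acc h
    match l with
    | [] => simp [PySem.Chars.replace.go, pvRepPure]
    | c :: t =>
      rw [PySem.Chars.replace.go]
      by_cases hpre : p.isPrefixOf (c :: t)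
      · rw [if_pos hpre]
        rw [ih ((c :: t).drop p.length) (r.reverse ++ acc) (by simp [List.length_drop]; simp at h; omega)]
        rw [pvRepPure, if_pos hpre]
        simp
      · rw [if_neg hpre]
        rw [ih t (c :: acc) (by simp at h ⊢; omega)]
        rw [pvRepPure, if_neg hpre]
        simp

theorem pvReplace_eq (p r : List Char) (hp : 0 < p.length) (l : List Char) :
    PySem.Chars.replace l p r = pvRepPure p r hp l := by
  rw [PySem.Chars.replace]
  rw [if_neg (by simp [List.isEmpty_iff]; exact List.ne_nil_of_length_pos hp)]
  exact pvGo_eq p r hp l.length l [] le_rfl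

-- pattern at the head: one replacement step
theorem pvRepPure_pref (p r : List Char) (hp : 0 < p.length) (Y : List Char) :
    pvRepPure p r hp (p ++ Y) = r ++ pvRepPure p r hp Y := by
  match p, hp with
  | c :: p', _ =>
    rw [pvRepPure.eq_def]
    simp only [List.cons_append]
    rw [if_pos (by exact List.isPrefixOf_iff_prefix.mpr ⟨Y, by simp⟩)]
    congr 1
    congr 1
    have h2 : ((c :: p') ++ Y).drop (c :: p').length = Y := List.drop_left
    simp only [List.cons_append] at h2
    exact h2

-- no occurrence of p starts strictly inside s ⇒ replace walks past s
theorem pvRepPure_skip (p r : List Char) (hp : 0 < p.length) :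
    ∀ (s X : List Char), (∀ i, i < s.length → ¬ p <+: (s ++ X).drop i) →
      pvRepPure p r hp (s ++ X) = s ++ pvRepPure p r hp X := by
  intro s
  induction s with
  | nil => intro X _; simp
  | cons c s' ih =>
    intro X hno
    rw [List.cons_append, pvRepPure]
    have h0 : ¬ p.isPrefixOf (c :: (s' ++ X)) := by
      intro hc
      exact hno 0 (by simp) (by simpa using List.isPrefixOf_iff_prefix.mp hc)
    rw [if_neg h0]
    have := ih X (fun i hi => by
      have := hno (i + 1) (by simp; omega)
      simpa using this)
    rw [this]
    simp

-- decidable certificate: every start position inside s sees a mismatch with p before s ends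
def pvCb (p s : List Char) : Bool :=
  s.tails.all (fun s' => s'.isEmpty || (!(s'.isPrefixOf p) && !(p.isPrefixOf s')))

theorem pvCb_sound (p s : List Char) (h : pvCb p s = true) :
    ∀ (X : List Char) (i : Nat), i < s.length → ¬ p <+: (s ++ X).drop i := by
  intro X i hi hpre
  have hmem : s.drop i ∈ s.tails := (List.mem_tails _ _).mpr (List.drop_suffix i s)
  have hall := List.all_eq_true.mp h _ hmem
  have hne : (s.drop i).isEmpty = false := by
    simp [List.drop_eq_nil_iff]; omega
  rw [hne] at hall
  simp only [Bool.false_or, Bool.and_eq_true, Bool.not_eq_true'] at hall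
  obtain ⟨h1, h2⟩ := hall
  rw [List.drop_append_of_le_length (Nat.le_of_lt hi)] at hpre
  rcases List.prefix_or_prefix_of_prefix hpre (List.prefix_append (s.drop i) X) with hc | hc
  · exact absurd (List.isPrefixOf_iff_prefix.mpr hc) (by simp [h2])
  · exact absurd (List.isPrefixOf_iff_prefix.mpr hc) (by simp [h1])

-- no nonempty suffix of P is a prefix of r ⇒ replacing (p → r) creates no new prefix-occurrence of any suffix of P
theorem pvTails_preserve (P p r : List Char) (hp : 0 < p.length)
    (hlen : P.length ≤ r.length)
    (hT : ∀ q, q <:+ P → q ≠ [] → ¬ q <+: r) :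
    ∀ (n : Nat) (u : List Char), u.length ≤ n →
      ∀ q, q <:+ P → q <+: pvRepPure p r hp u → q <+: u := by
  intro n
  induction n with
  | zero =>
    intro u hu q hsuf hpre
    have : u = [] := List.length_eq_zero_iff.mp (Nat.le_zero.mp hu)
    subst this
    simpa [pvRepPure] using hpre
  | succ m ih =>
    intro u hu q hsuf hpre
    match u with
    | [] => simpa [pvRepPure] using hpre
    | c :: t =>
      by_cases hm : p.isPrefixOf (c :: t)
      · rw [pvRepPure, if_pos hm] at hpre
        by_cases hq : q = []
        · subst hq; exact List.nil_prefix
        · exfalso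
          have hqlen : q.length ≤ r.length := le_trans (List.IsSuffix.length_le hsuf) hlen
          have : q <+: r := by
            have h1 := List.prefix_iff_eq_take.mp hpre
            rw [List.take_append_of_le_length hqlen] at h1
            rw [List.prefix_iff_eq_take]
            exact h1
          exact hT q hsuf hq this
      · rw [pvRepPure, if_neg hm] at hpre
        match q, hpre with
        | [], _ => exact List.nil_prefix
        | d :: q', hpre =>
          have hd : d = c := by
            have := List.prefix_iff_eq_take.mp hpre
            simp at this
            exact this.1
          subst hd
          have hq' : q' <+: pvRepPure p r hp t := by
            obtain ⟨v, hv⟩ := hpre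
            exact ⟨v, by simpa using hv⟩
          have hsuf' : q' <:+ P := List.IsSuffix.trans ⟨[d], rfl⟩ hsuf
          have := ih t (by simp at hu; omega) q' hsuf' hq'
          exact List.cons_prefix_cons.mpr ⟨rfl, this⟩

-- abbreviations for the three replace passes
def pvHp1 : 0 < pvPat1.length := by decide
def pvHp2 : 0 < pvPat2.length := by decide
def pvHp3 : 0 < pvPat3.length := by decide

-- non-interaction certificates between the literals
theorem pvCb12 : pvCb pvPat1 pvPat2 = true := by decide
theorem pvCb13 : pvCb pvPat1 pvPat3 = true := by decide
theorem pvCb23 : pvCb pvPat2 pvPat3 = true := by decide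
theorem pvCb2r1 : pvCb pvPat2 pvRep1 = true := by decide
theorem pvCb3r1 : pvCb pvPat3 pvRep1 = true := by decide
theorem pvCb3r2 : pvCb pvPat3 pvRep2 = true := by decide

theorem pvT2r1 : ∀ q, q <:+ pvPat2 → q ≠ [] → ¬ q <+: pvRep1 := by
  have h : ∀ q ∈ pvPat2.tails, q = [] ∨ ¬ q.isPrefixOf pvRep1 := by decide
  intro q hsuf hne hpre
  rcases h q ((List.mem_tails _ _).mpr hsuf) with h1 | h1
  · exact hne h1
  · exact h1 (List.isPrefixOf_iff_prefix.mpr hpre)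

theorem pvT3r1 : ∀ q, q <:+ pvPat3 → q ≠ [] → ¬ q <+: pvRep1 := by
  have h : ∀ q ∈ pvPat3.tails, q = [] ∨ ¬ q.isPrefixOf pvRep1 := by decide
  intro q hsuf hne hpre
  rcases h q ((List.mem_tails _ _).mpr hsuf) with h1 | h1
  · exact hne h1
  · exact h1 (List.isPrefixOf_iff_prefix.mpr hpre)

theorem pvT3r2 : ∀ q, q <:+ pvPat3 → q ≠ [] → ¬ q <+: pvRep2 := by
  have h : ∀ q ∈ pvPat3.tails, q = [] ∨ ¬ q.isPrefixOf pvRep2 := by decide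
  intro q hsuf hne hpre
  rcases h q ((List.mem_tails _ _).mpr hsuf) with h1 | h1
  · exact hne h1
  · exact h1 (List.isPrefixOf_iff_prefix.mpr hpre)

-- how the single pass reacts to each head shape
theorem pvScanB_pat1 (Y : List Char) : pvScanB (pvPat1 ++ Y) = pvRep1 ++ pvScanB Y := by
  cases hP : pvPat1 with
  | nil => exact absurd hP (by decide)
  | cons a p' =>
    rw [List.cons_append, pvScanB]
    rw [if_pos (by rw [← List.cons_append, ← hP]; exact List.isPrefixOf_iff_prefix.mpr ⟨Y, rfl⟩)]
    rw [← List.cons_append, ← hP, List.drop_left]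

theorem pvScanB_pat2 (Y : List Char) : pvScanB (pvPat2 ++ Y) = pvRep2 ++ pvScanB Y := by
  have hno1 : ¬ pvPat1 <+: (pvPat2 ++ Y) := by
    have := pvCb_sound pvPat1 pvPat2 pvCb12 Y 0 (by decide)
    simpa using this
  cases hP : pvPat2 with
  | nil => exact absurd hP (by decide)
  | cons a p' =>
    rw [List.cons_append, pvScanB]
    rw [if_neg (by rw [← List.cons_append, ← hP]; exact fun hc => hno1 (List.isPrefixOf_iff_prefix.mp hc))]
    rw [if_pos (by rw [← List.cons_append, ← hP]; exact List.isPrefixOf_iff_prefix.mpr ⟨Y, rfl⟩)]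
    rw [← List.cons_append, ← hP, List.drop_left]

theorem pvScanB_pat3 (Y : List Char) : pvScanB (pvPat3 ++ Y) = pvRep3 ++ pvScanB Y := by
  have hno1 : ¬ pvPat1 <+: (pvPat3 ++ Y) := by
    have := pvCb_sound pvPat1 pvPat3 pvCb13 Y 0 (by decide)
    simpa using this
  have hno2 : ¬ pvPat2 <+: (pvPat3 ++ Y) := by
    have := pvCb_sound pvPat2 pvPat3 pvCb23 Y 0 (by decide)
    simpa using this
  cases hP : pvPat3 with
  | nil => exact absurd hP (by decide)
  | cons a p' =>
    rw [List.cons_append, pvScanB]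
    rw [if_neg (by rw [← List.cons_append, ← hP]; exact fun hc => hno1 (List.isPrefixOf_iff_prefix.mp hc))]
    rw [if_neg (by rw [← List.cons_append, ← hP]; exact fun hc => hno2 (List.isPrefixOf_iff_prefix.mp hc))]
    rw [if_pos (by rw [← List.cons_append, ← hP]; exact List.isPrefixOf_iff_prefix.mpr ⟨Y, rfl⟩)]
    rw [← List.cons_append, ← hP, List.drop_left]

-- the heart: three sequential replaces equal the single pass
theorem pvMain : ∀ (n : Nat) (l : List Char), l.length ≤ n →
    pvRepPure pvPat3 pvRep3 pvHp3 (pvRepPure pvPat2 pvRep2 pvHp2 (pvRepPure pvPat1 pvRep1 pvHp1 l))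
      = pvScanB l := by
  intro n
  induction n with
  | zero =>
    intro l hl
    have : l = [] := List.length_eq_zero_iff.mp (Nat.le_zero.mp hl)
    subst this
    simp [pvRepPure, pvScanB]
  | succ m ih =>
    intro l hl
    match l with
    | [] => simp [pvRepPure, pvScanB]
    | c :: t =>
      by_cases h1 : pvPat1 <+: (c :: t)
      · obtain ⟨l', hl'⟩ := h1
        rw [← hl']
        rw [pvRepPure_pref pvPat1 pvRep1 pvHp1]
        rw [pvRepPure_skip pvPat2 pvRep2 pvHp2 pvRep1 _ (pvCb_sound _ _ pvCb2r1 _)]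
        rw [pvRepPure_skip pvPat3 pvRep3 pvHp3 pvRep1 _ (pvCb_sound _ _ pvCb3r1 _)]
        have hlen : l'.length ≤ m := by
          have := congrArg List.length hl'
          simp at this hl
          have := pvHp1
          omega
        rw [ih l' hlen, pvScanB_pat1]
      · by_cases h2 : pvPat2 <+: (c :: t)
        · obtain ⟨l', hl'⟩ := h2
          rw [← hl']
          rw [pvRepPure_skip pvPat1 pvRep1 pvHp1 pvPat2 _ (pvCb_sound _ _ pvCb12 _)]
          rw [pvRepPure_pref pvPat2 pvRep2 pvHp2]
          rw [pvRepPure_skip pvPat3 pvRep3 pvHp3 pvRep2 _ (pvCb_sound _ _ pvCb3r2 _)]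
          have hlen : l'.length ≤ m := by
            have := congrArg List.length hl'
            simp at this hl
            have := pvHp2
            omega
          rw [ih l' hlen, pvScanB_pat2]
        · by_cases h3 : pvPat3 <+: (c :: t)
          · obtain ⟨l', hl'⟩ := h3
            rw [← hl']
            rw [pvRepPure_skip pvPat1 pvRep1 pvHp1 pvPat3 _ (pvCb_sound _ _ pvCb13 _)]
            rw [pvRepPure_skip pvPat2 pvRep2 pvHp2 pvPat3 _ (pvCb_sound _ _ pvCb23 _)]
            rw [pvRepPure_pref pvPat3 pvRep3 pvHp3]
            have hlen : l'.length ≤ m := by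
              have := congrArg List.length hl'
              simp at this hl
              have := pvHp3
              omega
            rw [ih l' hlen, pvScanB_pat3]
          · -- no pattern at this position: every pass copies c
            have e1 : pvRepPure pvPat1 pvRep1 pvHp1 (c :: t) = c :: pvRepPure pvPat1 pvRep1 pvHp1 t := by
              rw [pvRepPure, if_neg (fun hc => h1 (List.isPrefixOf_iff_prefix.mp hc))]
            rw [e1]
            have hn2 : ¬ pvPat2 <+: (c :: pvRepPure pvPat1 pvRep1 pvHp1 t) := by
              intro hc
              apply h2
              match hq : pvPat2, hc with
              | [], _ => exact absurd hq (by decide)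
              | d :: q', hc =>
                have hd := (List.cons_prefix_cons.mp hc).1
                have hq' := (List.cons_prefix_cons.mp hc).2
                have hsuf : q' <:+ pvPat2 := by rw [hq]; exact ⟨[d], rfl⟩
                have := pvTails_preserve pvPat2 pvPat1 pvRep1 pvHp1 (by decide) pvT2r1
                  t.length t le_rfl q' hsuf hq'
                exact List.cons_prefix_cons.mpr ⟨hd, this⟩
            have e2 : pvRepPure pvPat2 pvRep2 pvHp2 (c :: pvRepPure pvPat1 pvRep1 pvHp1 t)
                = c :: pvRepPure pvPat2 pvRep2 pvHp2 (pvRepPure pvPat1 pvRep1 pvHp1 t) := by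
              rw [pvRepPure, if_neg (fun hc => hn2 (List.isPrefixOf_iff_prefix.mp hc))]
            rw [e2]
            have hn3 : ¬ pvPat3 <+: (c :: pvRepPure pvPat2 pvRep2 pvHp2 (pvRepPure pvPat1 pvRep1 pvHp1 t)) := by
              intro hc
              apply h3
              match hq : pvPat3, hc with
              | [], _ => exact absurd hq (by decide)
              | d :: q', hc =>
                have hd := (List.cons_prefix_cons.mp hc).1
                have hq' := (List.cons_prefix_cons.mp hc).2
                have hsuf : q' <:+ pvPat3 := by rw [hq]; exact ⟨[d], rfl⟩
                have s1 := pvTails_preserve pvPat3 pvPat2 pvRep2 pvHp2 (by decide) pvT3r2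
                  (pvRepPure pvPat1 pvRep1 pvHp1 t).length _ le_rfl q' hsuf hq'
                have s2 := pvTails_preserve pvPat3 pvPat1 pvRep1 pvHp1 (by decide) pvT3r1
                  t.length t le_rfl q' hsuf s1
                exact List.cons_prefix_cons.mpr ⟨hd, s2⟩
            have e3 : pvRepPure pvPat3 pvRep3 pvHp3 (c :: pvRepPure pvPat2 pvRep2 pvHp2 (pvRepPure pvPat1 pvRep1 pvHp1 t))
                = c :: pvRepPure pvPat3 pvRep3 pvHp3 (pvRepPure pvPat2 pvRep2 pvHp2 (pvRepPure pvPat1 pvRep1 pvHp1 t)) := by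
              rw [pvRepPure, if_neg (fun hc => hn3 (List.isPrefixOf_iff_prefix.mp hc))]
            rw [e3]
            rw [ih t (by simp at hl; omega)]
            conv_rhs => rw [pvScanB]
            rw [if_neg (fun hc => h1 (List.isPrefixOf_iff_prefix.mp hc))]
            rw [if_neg (fun hc => h2 (List.isPrefixOf_iff_prefix.mp hc))]
            rw [if_neg (fun hc => h3 (List.isPrefixOf_iff_prefix.mp hc))]

-- unfold A's fold over the dict into three Str.replace calls, then pass to char lists
theorem pvItems :
    ((((PySem.Dict.empty.insert "copy-data-folder-path" "Copy Data Folder Path").insert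
        "open-data-folder" "Open Data Folder").insert
        "reset-formatting" "Reset Formatting to Defaults" : PySem.Dict String String)).items
      = [("copy-data-folder-path", "Copy Data Folder Path"),
         ("open-data-folder", "Open Data Folder"),
         ("reset-formatting", "Reset Formatting to Defaults")] := by decide

theorem pvA_eq (html : String) :
    process_helper_links_py html
      = String.ofList (pvRepPure pvPat3 pvRep3 pvHp3 (pvRepPure pvPat2 pvRep2 pvHp2
          (pvRepPure pvPat1 pvRep1 pvHp1 html.toList))) := by
  simp only [process_helper_links_py]
  rw [pvItems]
  simp only [List.foldl]
  have hs1 : "<a href=\"#" ++ "copy-data-folder-path" ++ "\">" ++ "Copy Data Folder Path" ++ "</a>"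
      = "<a href=\"#copy-data-folder-path\">Copy Data Folder Path</a>" := rfl
  have hs2 : "<a href=\"helper://" ++ "copy-data-folder-path" ++ "\" class=\"helper-link\">" ++ "Copy Data Folder Path" ++ "</a>"
      = "<a href=\"helper://copy-data-folder-path\" class=\"helper-link\">Copy Data Folder Path</a>" := rfl
  have hs3 : "<a href=\"#" ++ "open-data-folder" ++ "\">" ++ "Open Data Folder" ++ "</a>"
      = "<a href=\"#open-data-folder\">Open Data Folder</a>" := rfl
  have hs4 : "<a href=\"helper://" ++ "open-data-folder" ++ "\" class=\"helper-link\">" ++ "Open Data Folder" ++ "</a>"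
      = "<a href=\"helper://open-data-folder\" class=\"helper-link\">Open Data Folder</a>" := rfl
  have hs5 : "<a href=\"#" ++ "reset-formatting" ++ "\">" ++ "Reset Formatting to Defaults" ++ "</a>"
      = "<a href=\"#reset-formatting\">Reset Formatting to Defaults</a>" := rfl
  have hs6 : "<a href=\"helper://" ++ "reset-formatting" ++ "\" class=\"helper-link\">" ++ "Reset Formatting to Defaults" ++ "</a>"
      = "<a href=\"helper://reset-formatting\" class=\"helper-link\">Reset Formatting to Defaults</a>" := rfl
  rw [hs1, hs2, hs3, hs4, hs5, hs6]
  simp only [PySem.Str.replace, String.toList_ofList]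
  rw [show "<a href=\"#copy-data-folder-path\">Copy Data Folder Path</a>".toList = pvPat1 from rfl,
      show "<a href=\"helper://copy-data-folder-path\" class=\"helper-link\">Copy Data Folder Path</a>".toList = pvRep1 from rfl,
      show "<a href=\"#open-data-folder\">Open Data Folder</a>".toList = pvPat2 from rfl,
      show "<a href=\"helper://open-data-folder\" class=\"helper-link\">Open Data Folder</a>".toList = pvRep2 from rfl,
      show "<a href=\"#reset-formatting\">Reset Formatting to Defaults</a>".toList = pvPat3 from rfl,
      show "<a href=\"helper://reset-formatting\" class=\"helper-link\">Reset Formatting to Defaults</a>".toList = pvRep3 from rfl]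
  rw [pvReplace_eq pvPat1 pvRep1 pvHp1 html.toList]
  rw [pvReplace_eq pvPat2 pvRep2 pvHp2]
  rw [pvReplace_eq pvPat3 pvRep3 pvHp3]

-- ===== VERDICT (by name: the statement is the Claim_ definition above) =====
theorem process_helper_links_py_spec : Claim_equal_process_helper_links_py := by
  intro html _
  unfold Spec_process_helper_links_py process_helper_links_py_alt
  rw [pvA_eq html]
  rw [pvMain html.toList.length html.toList le_rfl]
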